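-- pv_equiv track=rewrite | github.com/Axionatic/Mystery-Manager | validate_prices.py | _find_price_columns
-- ===== SOURCE A (Python) =====
-- def _find_price_columns(headers):
--     """Find ID, Item, and price column indices."""
--     id_col = item_col = price_col = None
--     for i, h in enumerate(headers):
--         hs = str(h).strip() if h else ""
--         if hs == "ID":
--             id_col = i
--         elif hs in ("Item", "Name"):
--             item_col = i
--         elif hs in ("Price Ea", "JS Price Ea"):
--             price_col = i
--     return id_col, item_col, price_col
-- ===== SOURCE B (Python) =====
-- def _find_price_columns(headers):
--     """Find ID, Item, and price column indices."""
--     def norm(h):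
--         return str(h).strip() if h else ""
--
--     def last(names):
--         # scan back-to-front, return on first (i.e. last) match
--         for i, h in reversed(list(enumerate(headers))):
--             if norm(h) in names:
--                 return i
--         return None
--
--     return last(("ID",)), last(("Item", "Name")), last(("Price Ea", "JS Price Ea"))
-- ===== Notes on version B (the rewrite author's own statement) =====
-- stated objective: alternative
-- what changed: Replaces the single forward pass with three-way overwriting state by three independent backward scans (one per column role) that each return on the first match seen from the end.
import Mathlib
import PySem

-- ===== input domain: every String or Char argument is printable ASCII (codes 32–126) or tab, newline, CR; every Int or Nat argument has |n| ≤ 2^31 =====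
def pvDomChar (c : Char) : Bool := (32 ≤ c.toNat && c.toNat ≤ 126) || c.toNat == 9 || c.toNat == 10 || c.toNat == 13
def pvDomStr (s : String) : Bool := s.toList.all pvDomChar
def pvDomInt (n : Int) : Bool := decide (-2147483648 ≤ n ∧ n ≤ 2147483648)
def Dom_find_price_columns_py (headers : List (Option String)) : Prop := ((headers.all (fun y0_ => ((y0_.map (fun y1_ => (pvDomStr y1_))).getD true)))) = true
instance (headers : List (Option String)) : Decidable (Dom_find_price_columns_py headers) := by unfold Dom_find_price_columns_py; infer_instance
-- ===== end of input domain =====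

-- ===== PORT A =====
-- B differs from A by decomposition: A is one forward pass with overwriting state;
-- B does three independent backward scans, one per column role.
def pvNorm (h : Option String) : String :=
  match h with
  | none => ""
  | some s => if s = "" then "" else PySem.Str.strip s

def pvStepA (st : Option Int × Option Int × Option Int) (p : Int × Option String) :
    Option Int × Option Int × Option Int :=
  let hs := pvNorm p.2
  if hs = "ID" then (some p.1, st.2.1, st.2.2)
  else if ["Item", "Name"].contains hs then (st.1, some p.1, st.2.2)
  else if ["Price Ea", "JS Price Ea"].contains hs then (st.1, st.2.1, some p.1)
  else st

def find_price_columns_py (headers : List (Option String)) : Option Int × Option Int × Option Int :=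
  (PySem.List.enumerate headers).foldl pvStepA (none, none, none)

-- ===== PORT B =====
def pvLastB (headers : List (Option String)) (names : List String) : Option Int :=
  ((PySem.List.enumerate headers).reverse).findSome?
    (fun p => if names.contains (pvNorm p.2) then some p.1 else none)

def find_price_columns_py_alt (headers : List (Option String)) : Option Int × Option Int × Option Int :=
  (pvLastB headers ["ID"], pvLastB headers ["Item", "Name"],
   pvLastB headers ["Price Ea", "JS Price Ea"])

-- ===== PRECONDITION & SPEC =====
def Spec_find_price_columns_py (headers : List (Option String)) (out : Option Int × Option Int × Option Int) : Prop := out = find_price_columns_py_alt headers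
instance (headers : List (Option String)) (out : Option Int × Option Int × Option Int) : Decidable (Spec_find_price_columns_py headers out) := by unfold Spec_find_price_columns_py; infer_instance

-- ===== CLAIM (what is proved, stated in full; the proofs are below) =====
def Claim_equal_find_price_columns_py : Prop := ∀ (headers : List (Option String)), Dom_find_price_columns_py headers → Spec_find_price_columns_py headers (find_price_columns_py headers)

-- ===== LEMMAS AND PROOFS =====

theorem pvLastB_append (l : List (Option String)) (x : Option String) (names : List String) :
    pvLastB (l ++ [x]) names =
      (if names.contains (pvNorm x) then some ((l.length : Int)) else pvLastB l names) := by
  simp [pvLastB, PySem.List.enumerate_append, PySem.List.enumerate_cons]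
  by_cases h : pvNorm x ∈ names <;> simp [h]

theorem fold_eq_lasts (l : List (Option String)) :
    (PySem.List.enumerate l).foldl pvStepA (none, none, none) =
      (pvLastB l ["ID"], pvLastB l ["Item", "Name"],
       pvLastB l ["Price Ea", "JS Price Ea"]) := by
  induction l using List.reverseRecOn with
  | nil => simp [pvLastB, PySem.List.enumerate]
  | append_singleton l x ih =>
    rw [PySem.List.enumerate_append]
    simp only [List.foldl_append, ih, PySem.List.enumerate_cons, PySem.List.enumerate_nil,
      List.foldl_cons, List.foldl_nil, pvLastB_append]
    simp only [pvStepA, List.contains_eq_mem, List.mem_cons, List.not_mem_nil,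
      or_false, decide_eq_true_eq, zero_add]
    by_cases h1 : pvNorm x = "ID"
    · have h2 : ¬(pvNorm x = "Item" ∨ pvNorm x = "Name") := by simp [h1]
      have h3 : ¬(pvNorm x = "Price Ea" ∨ pvNorm x = "JS Price Ea") := by simp [h1]
      rw [if_pos h1, if_pos h1, if_neg h2, if_neg h3]
    · by_cases h2 : pvNorm x = "Item" ∨ pvNorm x = "Name"
      · have h3 : ¬(pvNorm x = "Price Ea" ∨ pvNorm x = "JS Price Ea") := by
          rcases h2 with h | h <;> simp [h]
        rw [if_neg h1, if_pos h2, if_neg h1, if_pos h2, if_neg h3]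
      · by_cases h3 : pvNorm x = "Price Ea" ∨ pvNorm x = "JS Price Ea"
        · rw [if_neg h1, if_neg h2, if_pos h3, if_neg h1, if_neg h2, if_pos h3]
        · rw [if_neg h1, if_neg h2, if_neg h3, if_neg h1, if_neg h2, if_neg h3]

-- ===== VERDICT (by name: the statement is the Claim_ definition above) =====
theorem find_price_columns_py_spec : Claim_equal_find_price_columns_py := by
  intro headers _
  unfold Spec_find_price_columns_py find_price_columns_py find_price_columns_py_alt
  exact fold_eq_lasts headers
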